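-- pv_equiv track=rewrite | github.com/BillFu/LPCTron_ZH | infer_grpc/frontend_infer/frontend/fix_duoyinzi.py | extract_duoyinzi
-- ===== SOURCE A (Python) =====
-- def extract_duoyinzi(sentence, poly_py_chars):
-- 	duoyinzi_info = []
-- 	for i, hz_char in enumerate(sentence):
-- 		if hz_char in poly_py_chars:
-- 			if i - 2 >= 0:
-- 				front = i - 2
-- 			else:
-- 				front = 0
-- 			head_padding_num = front - (i - 2)
--
-- 			if i + 2 <= len(sentence) - 1:
-- 				end = i + 2
-- 			else:
-- 				end = len(sentence) - 1
-- 			tail_padding_num = i + 2 - end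
--
-- 			prefix = '*' * head_padding_num
-- 			suffix = '*' * tail_padding_num
-- 			context = prefix + sentence[front: end + 1] + suffix
--
-- 			# insert a '.' to indicator current focus character
-- 			context = context[:3] + '.' + context[3:]
-- 			duoyinzi_info.append([hz_char, i, context])
--
-- 	return duoyinzi_info
-- ===== SOURCE B (Python) =====
-- def extract_duoyinzi(sentence, poly_py_chars):
--     padded = '**' + sentence + '**'
--     duoyinzi_info = []
--     for i, hz_char in enumerate(sentence):
--         if hz_char in poly_py_chars:
--             w = padded[i:i + 5]
--             duoyinzi_info.append([hz_char, i, w[:3] + '.' + w[3:]])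
--     return duoyinzi_info
-- ===== Notes on version B (the rewrite author's own statement) =====
-- stated objective: simpler
-- what changed: B precomputes a single '*'-padded copy of the sentence and extracts each context as one uniform 5-character slice padded[i:i+5], eliminating A's front/end/head_padding_num/tail_padding_num branch arithmetic and string assembly per match.
import Mathlib
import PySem

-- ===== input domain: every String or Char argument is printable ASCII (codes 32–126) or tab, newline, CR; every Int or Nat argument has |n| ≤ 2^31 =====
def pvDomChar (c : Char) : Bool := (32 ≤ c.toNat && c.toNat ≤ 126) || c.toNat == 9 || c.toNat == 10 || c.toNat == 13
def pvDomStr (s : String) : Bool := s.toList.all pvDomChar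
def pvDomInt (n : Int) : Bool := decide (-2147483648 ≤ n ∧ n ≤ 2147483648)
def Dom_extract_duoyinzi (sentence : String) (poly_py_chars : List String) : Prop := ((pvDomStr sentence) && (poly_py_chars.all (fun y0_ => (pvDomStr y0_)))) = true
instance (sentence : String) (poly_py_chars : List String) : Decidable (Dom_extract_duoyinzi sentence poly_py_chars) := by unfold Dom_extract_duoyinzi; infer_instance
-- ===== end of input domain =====

-- B replaces A's four-way front/end/padding branch arithmetic by one precomputed '*'-padded
-- sentence and a uniform 5-character slice (objective: simpler; same O(n·m) cost).

-- ===== PORT A =====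
def extract_duoyinzi (sentence : String) (poly_py_chars : List String) : List (String × Int × String) :=
  (PySem.List.enumerate sentence.toList 0).foldl (fun duoyinzi_info p =>
    if String.ofList [p.2] ∈ poly_py_chars then
      let i := p.1
      let front : Int := if 0 ≤ i - 2 then i - 2 else 0
      let head_padding_num : Int := front - (i - 2)
      let e : Int := if i + 2 ≤ (sentence.toList.length : Int) - 1 then i + 2 else (sentence.toList.length : Int) - 1
      let tail_padding_num : Int := i + 2 - e
      let context : List Char := List.replicate head_padding_num.toNat '*'
        ++ PySem.List.slice sentence.toList (some front) (some (e + 1))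
        ++ List.replicate tail_padding_num.toNat '*'
      let context2 : List Char := PySem.List.slice context none (some 3) ++ '.' :: PySem.List.slice context (some 3) none
      duoyinzi_info ++ [(String.ofList [p.2], i, String.ofList context2)]
    else duoyinzi_info) []

-- ===== PORT B =====
def extract_duoyinzi_alt (sentence : String) (poly_py_chars : List String) : List (String × Int × String) :=
  let padded : List Char := ['*', '*'] ++ sentence.toList ++ ['*', '*']
  (PySem.List.enumerate sentence.toList 0).foldl (fun duoyinzi_info p =>
    if String.ofList [p.2] ∈ poly_py_chars then
      let w : List Char := PySem.List.slice padded (some p.1) (some (p.1 + 5))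
      duoyinzi_info ++ [(String.ofList [p.2], p.1,
        String.ofList (PySem.List.slice w none (some 3) ++ '.' :: PySem.List.slice w (some 3) none))]
    else duoyinzi_info) []

-- ===== PRECONDITION & SPEC =====
def Spec_extract_duoyinzi (sentence : String) (poly_py_chars : List String) (out : List (String × Int × String)) : Prop := out = extract_duoyinzi_alt sentence poly_py_chars
instance (sentence : String) (poly_py_chars : List String) (out : List (String × Int × String)) : Decidable (Spec_extract_duoyinzi sentence poly_py_chars out) := by unfold Spec_extract_duoyinzi; infer_instance

-- ===== CLAIM (what is proved, stated in full; the proofs are below) =====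
def Claim_equal_extract_duoyinzi : Prop := ∀ (sentence : String) (poly_py_chars : List String), Dom_extract_duoyinzi sentence poly_py_chars → Spec_extract_duoyinzi sentence poly_py_chars (extract_duoyinzi sentence poly_py_chars)

-- ===== LEMMAS AND PROOFS =====

-- A's branch-assembled, '*'-padded 5-character window around position k equals the uniform
-- slice padded[k : k+5] of the '*'-padded sentence.
lemma ctx_eq (s : List Char) (k : Nat) (hk : k < s.length) :
    (List.replicate (((if 0 ≤ (k:Int) - 2 then (k:Int) - 2 else 0) - ((k:Int) - 2)).toNat) '*'
      ++ PySem.List.slice s (some (if 0 ≤ (k:Int) - 2 then (k:Int) - 2 else 0))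
          (some ((if (k:Int) + 2 ≤ (s.length:Int) - 1 then (k:Int) + 2 else (s.length:Int) - 1) + 1))
      ++ List.replicate (((k:Int) + 2 - (if (k:Int) + 2 ≤ (s.length:Int) - 1 then (k:Int) + 2 else (s.length:Int) - 1)).toNat) '*')
    = PySem.List.slice (['*','*'] ++ s ++ ['*','*']) (some (k:Int)) (some ((k:Int) + 5)) := by
  have h5 : ((k:Int) + 5) = ((k + 5 : Nat) : Int) := by push_cast; ring
  rw [h5, PySem.List.slice_natCast]
  have h55 : k + 5 - k = 5 := by omega
  rw [h55]
  set n := s.length with hn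
  have hrep : (['*','*'] : List Char) = List.replicate 2 '*' := rfl
  rcases Nat.lt_or_ge k 2 with hk2 | hk2
  · have hfront : ¬ (0 ≤ (k:Int) - 2) := by omega
    rw [if_neg hfront]
    rcases Nat.lt_or_ge n (k+3) with hn3 | hn3
    · have he : ¬ ((k:Int) + 2 ≤ (n:Int) - 1) := by omega
      rw [if_neg he]
      rw [show ((0:Int) - ((k:Int)-2)).toNat = 2-k from by omega]
      rw [show ((k:Int)+2-((n:Int)-1)).toNat = k+3-n from by omega]
      rw [show ((n:Int)-1+1) = ((n:Nat):Int) from by omega]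
      rw [show PySem.List.slice s (some 0) (some ((n:Nat):Int)) = PySem.List.slice s none (some ((n:Nat):Int)) from PySem.List.slice_zero_start s _]
      rw [PySem.List.slice_to_natCast, List.take_of_length_le (by omega)]
      rw [hrep, List.drop_append, List.take_append]
      rw [List.take_of_length_le (by simp; omega)]
      rw [List.drop_append, List.drop_replicate, List.drop_replicate, List.take_replicate]
      rw [show k - (List.replicate 2 '*' : List Char).length = 0 from by simp; omega, List.drop_zero]
      simp [List.append_assoc]
      omega
    · have he : ((k:Int) + 2 ≤ (n:Int) - 1) := by omega
      rw [if_pos he]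
      rw [show ((0:Int) - ((k:Int)-2)).toNat = 2-k from by omega]
      rw [show ((k:Int)+2-((k:Int)+2)).toNat = 0 from by omega]
      rw [show ((k:Int)+2+1) = (((k+3:Nat)):Int) from by push_cast; ring]
      rw [show PySem.List.slice s (some 0) (some ((k+3:Nat):Int)) = PySem.List.slice s none (some ((k+3:Nat):Int)) from PySem.List.slice_zero_start s _]
      rw [PySem.List.slice_to_natCast]
      rw [hrep]
      simp only [List.drop_append, List.drop_replicate, List.take_append, List.take_replicate,
        List.length_replicate, List.length_append, List.length_drop]
      rw [show k - 2 = 0 from by omega, List.drop_zero]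
      rw [show min 5 (2-k) = 2-k from by omega, show 5-(2-k) = k+3 from by omega,
        show min (5 - (2 - k + (s.length - 0))) (2 - (k - (2 + s.length))) = 0 from by omega]
  · obtain ⟨m, rfl⟩ : ∃ m, k = m + 2 := ⟨k - 2, by omega⟩
    have hfront : (0 ≤ ((m+2:Nat):Int) - 2) := by push_cast; omega
    rw [if_pos hfront]
    rw [show (((m+2:Nat):Int) - 2 - (((m+2:Nat):Int) - 2)).toNat = 0 from by omega]
    rw [show (((m+2:Nat):Int) - 2) = ((m:Nat):Int) from by push_cast; ring]
    rcases Nat.lt_or_ge n (m+5) with hn3 | hn3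
    · have he : ¬ (((m+2:Nat):Int) + 2 ≤ (n:Int) - 1) := by push_cast; omega
      rw [if_neg he]
      rw [show ((n:Int)-1+1) = ((n:Nat):Int) from by omega]
      rw [PySem.List.slice_natCast]
      rw [show (((m+2:Nat):Int) + 2 - ((n:Int)-1)).toNat = m+5-n from by omega]
      rw [List.take_of_length_le (by simp; omega)]
      rw [hrep]
      simp only [List.drop_append, List.drop_replicate, List.take_append, List.take_replicate,
        List.length_replicate, List.length_append, List.length_drop]
      rw [show m + 2 - 2 = m from by omega]
      rw [List.take_of_length_le (le_of_eq_of_le (by simp) (by omega : s.length - m ≤ 5 - (2 - (m + 2))))]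
      rw [show min 5 (2 - (m + 2)) = 0 from by omega,
        show min (5 - (2 - (m + 2) + (s.length - m))) (2 - (m + 2 - (2 + s.length))) = m + 5 - n from by omega]
    · have he : (((m+2:Nat):Int) + 2 ≤ (n:Int) - 1) := by push_cast; omega
      rw [if_pos he]
      rw [show (((m+2:Nat):Int) + 2 - (((m+2:Nat):Int) + 2)).toNat = 0 from by omega]
      rw [show (((m+2:Nat):Int) + 2 + 1) = (((m+5:Nat)):Int) from by push_cast; ring]
      rw [PySem.List.slice_natCast]
      rw [hrep]
      simp only [List.drop_append, List.drop_replicate, List.take_append, List.take_replicate,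
        List.length_replicate, List.length_append, List.length_drop]
      rw [show m + 2 - 2 = m from by omega, show m + 5 - m = 5 from by omega,
        show min 5 (2 - (m + 2)) = 0 from by omega, show 5 - (2 - (m + 2)) = 5 from by omega,
        show min (5 - (2 - (m + 2) + (s.length - m))) (2 - (m + 2 - (2 + s.length))) = 0 from by omega]

-- ===== VERDICT (by name: the statement is the Claim_ definition above) =====
theorem extract_duoyinzi_spec : Claim_equal_extract_duoyinzi := by
  intro sentence poly_py_chars _
  unfold Spec_extract_duoyinzi extract_duoyinzi extract_duoyinzi_alt
  apply PySem.List.foldl_congr_mem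
  intro acc p hp
  obtain ⟨k, hk, rfl⟩ := (PySem.List.mem_enumerate_iff _ _ _).1 hp
  simp only [zero_add]
  by_cases hmem : String.ofList [sentence.toList[k]] ∈ poly_py_chars
  · rw [if_pos hmem, if_pos hmem]
    rw [ctx_eq sentence.toList k hk]
  · rw [if_neg hmem, if_neg hmem]
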